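-- pv_equiv track=rewrite | github.com/eLifePathways/sciencebeam-grobid-metadata-enricher | src/grobid_metadata_enricher/pipeline.py | _filter_llm_selection_to_candidates
-- ===== SOURCE A (Python) =====
-- from typing import Any, Callable, Dict, List, Optional, Sequence, Tuple
--
-- def normalize_whitespace(text: str) -> str:
--     return " ".join((text or "").split())
--
-- def _normalise_selection_key(value: str) -> str:
--     return normalize_whitespace(value).casefold()
--
-- def _filter_llm_selection_to_candidates(
--     selected_values: Sequence[str],
--     candidate_sets: Sequence[Tuple[str, Sequence[str]]],
-- ) -> List[str]:
--     by_key: Dict[str, str] = {}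
--     for _, values in candidate_sets:
--         for value in values:
--             text = str(value).strip()
--             key = _normalise_selection_key(text)
--             if key and key not in by_key:
--                 by_key[key] = text
--     out: List[str] = []
--     seen = set()
--     for value in selected_values:
--         key = _normalise_selection_key(str(value))
--         candidate = by_key.get(key)
--         if not candidate or key in seen:
--             continue
--         out.append(candidate)
--         seen.add(key)
--     return out
-- ===== SOURCE B (Python) =====
-- def normalize_whitespace(text):
--     return " ".join((text or "").split())
--
--
-- def _normalise_selection_key(value):
--     return normalize_whitespace(value).casefold()
--
--
-- def _first_candidate_match(key, candidate_sets):
--     for _, values in candidate_sets: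
--         for candidate in values:
--             text = str(candidate).strip()
--             if _normalise_selection_key(text) == key:
--                 return text
--     return None
--
--
-- def _filter_llm_selection_to_candidates(selected_values, candidate_sets):
--     out = []
--     seen = set()
--     for value in selected_values:
--         key = _normalise_selection_key(str(value))
--         if not key or key in seen:
--             continue
--         text = _first_candidate_match(key, candidate_sets)
--         if text is not None:
--             out.append(text)
--             seen.add(key)
--     return out
-- ===== Notes on version B (the rewrite author's own statement) =====
-- stated objective: alternative
-- what changed: Drops A's prebuilt by_key dict entirely: for each selected value B scans candidate_sets in order for the first candidate whose normalized key matches, relying on first-match order to reproduce A's dict of first-seen texts.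
import Mathlib
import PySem

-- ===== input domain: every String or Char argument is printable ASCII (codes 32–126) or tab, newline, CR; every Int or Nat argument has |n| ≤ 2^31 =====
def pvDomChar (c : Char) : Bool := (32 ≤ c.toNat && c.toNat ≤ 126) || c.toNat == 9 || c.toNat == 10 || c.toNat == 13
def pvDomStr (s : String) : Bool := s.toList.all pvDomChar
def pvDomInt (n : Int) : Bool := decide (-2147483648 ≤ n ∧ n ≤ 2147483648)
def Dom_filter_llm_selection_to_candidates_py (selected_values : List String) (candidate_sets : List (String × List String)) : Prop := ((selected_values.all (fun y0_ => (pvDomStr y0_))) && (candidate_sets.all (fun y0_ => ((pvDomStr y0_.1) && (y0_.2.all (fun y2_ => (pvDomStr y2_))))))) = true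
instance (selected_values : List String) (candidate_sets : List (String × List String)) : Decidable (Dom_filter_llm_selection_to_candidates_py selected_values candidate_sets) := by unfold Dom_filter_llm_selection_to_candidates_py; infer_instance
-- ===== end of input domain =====

-- B drops A's prebuilt by_key dict and instead scans candidate_sets per selected value
-- for the first normalized-key match (alternative decomposition, same results).


-- ===== PORT A =====
-- _normalise_selection_key; casefold = lower, exact on the ASCII domain
def pvNormKey (s : String) : String :=
  PySem.Str.lower (PySem.Str.join " " (PySem.Str.split₀ s))

-- the by_key-building loop of A
def pvBuildByKey (candidate_sets : List (String × List String)) : PySem.Dict String String :=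
  candidate_sets.foldl (fun d p =>
    p.2.foldl (fun d v =>
      let text := PySem.Str.strip v
      let key := pvNormKey text
      if key ≠ "" ∧ d.contains key = false then d.insert key text else d) d) PySem.Dict.empty

def filter_llm_selection_to_candidates_py (selected_values : List String) (candidate_sets : List (String × List String)) : List String :=
  let by_key := pvBuildByKey candidate_sets
  (selected_values.foldl (fun acc v =>
    let key := pvNormKey v
    match by_key.get? key with
    | none => acc            -- candidate is None → 'not candidate' → continue
    | some c =>
      if c = "" ∨ PySem.Set.contains acc.2 key then acc
      else (acc.1 ++ [c], PySem.Set.add acc.2 key))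
    (([] : List String), (PySem.Set.empty : PySem.Set String))).1

-- ===== PORT B =====
-- _first_candidate_match: inner loop over one values list
def pvFirstInValues (key : String) : List String → Option String
  | [] => none
  | v :: rest =>
    let text := PySem.Str.strip v
    if pvNormKey text = key then some text else pvFirstInValues key rest

def pvFirstMatch (key : String) : List (String × List String) → Option String
  | [] => none
  | p :: rest =>
    match pvFirstInValues key p.2 with
    | some t => some t
    | none => pvFirstMatch key rest

def filter_llm_selection_to_candidates_py_alt (selected_values : List String) (candidate_sets : List (String × List String)) : List String :=
  (selected_values.foldl (fun acc v =>
    let key := pvNormKey v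
    if key = "" ∨ PySem.Set.contains acc.2 key then acc
    else
      match pvFirstMatch key candidate_sets with
      | none => acc
      | some t => (acc.1 ++ [t], PySem.Set.add acc.2 key))
    (([] : List String), (PySem.Set.empty : PySem.Set String))).1

-- ===== PRECONDITION & SPEC =====
def Spec_filter_llm_selection_to_candidates_py (selected_values : List String) (candidate_sets : List (String × List String)) (out : List String) : Prop := out = filter_llm_selection_to_candidates_py_alt selected_values candidate_sets
instance (selected_values : List String) (candidate_sets : List (String × List String)) (out : List String) : Decidable (Spec_filter_llm_selection_to_candidates_py selected_values candidate_sets out) := by unfold Spec_filter_llm_selection_to_candidates_py; infer_instance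

-- ===== CLAIM (what is proved, stated in full; the proofs are below) =====
def Claim_equal_filter_llm_selection_to_candidates_py : Prop := ∀ (selected_values : List String) (candidate_sets : List (String × List String)), Dom_filter_llm_selection_to_candidates_py selected_values candidate_sets → Spec_filter_llm_selection_to_candidates_py selected_values candidate_sets (filter_llm_selection_to_candidates_py selected_values candidate_sets)

-- ===== LEMMAS AND PROOFS =====

lemma pvNormKey_empty : pvNormKey "" = "" := by decide

-- inner values loop: lookup after the fold = old value, else first match in values
lemma get?_foldl_values (values : List String) (d : PySem.Dict String String) (k : String)
    (hk : k ≠ "") :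
    (values.foldl (fun d v =>
      let text := PySem.Str.strip v
      let key := pvNormKey text
      if key ≠ "" ∧ d.contains key = false then d.insert key text else d) d).get? k
    = (d.get? k).or (pvFirstInValues k values) := by
  induction values generalizing d with
  | nil => simp [pvFirstInValues]
  | cons v rest ih =>
    simp only [List.foldl_cons, pvFirstInValues]
    by_cases hc : (pvNormKey (PySem.Str.strip v) ≠ "" ∧
        d.contains (pvNormKey (PySem.Str.strip v)) = false)
    · rw [if_pos hc, ih]
      by_cases hkey : pvNormKey (PySem.Str.strip v) = k
      · have hdk : d.get? k = none := by
          have hsome : (d.get? k).isSome = false := by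
            rw [← PySem.Dict.contains_eq_isSome_get?, ← hkey]; exact hc.2
          rcases hget : d.get? k with _ | w
          · rfl
          · rw [hget] at hsome; simp at hsome
        rw [hkey, PySem.Dict.get?_insert_self, hdk]
        simp [Option.or]
      · rw [PySem.Dict.get?_insert_of_ne _ _ (fun he => hkey he.symm), if_neg hkey]
    · rw [if_neg hc, ih]
      by_cases hkey : pvNormKey (PySem.Str.strip v) = k
      · have hcont : d.contains k = true := by
        -- hc is false and the key is nonempty, so containment must be true
          rcases h' : d.contains k with _ | _
          · exact absurd ⟨hkey ▸ hk, hkey ▸ h'⟩ hc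
          · rfl
        have hsome : (d.get? k).isSome = true := by
          rw [← PySem.Dict.contains_eq_isSome_get?]; exact hcont
        rcases hget : d.get? k with _ | w
        · rw [hget] at hsome; simp at hsome
        · simp [Option.or]
      · rw [if_neg hkey]

-- outer build loop: lookup in by_key = first match over all candidate sets (nonempty key)
lemma get?_build_aux (sets : List (String × List String)) (d : PySem.Dict String String)
    (k : String) (hk : k ≠ "") :
    (sets.foldl (fun d p =>
      p.2.foldl (fun d v =>
        let text := PySem.Str.strip v
        let key := pvNormKey text
        if key ≠ "" ∧ d.contains key = false then d.insert key text else d) d) d).get? k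
    = (d.get? k).or (pvFirstMatch k sets) := by
  induction sets generalizing d with
  | nil => simp [pvFirstMatch]
  | cons p rest ih =>
    simp only [List.foldl_cons, pvFirstMatch]
    rw [ih, get?_foldl_values _ _ _ hk]
    rcases d.get? k with _ | w <;> rcases h : pvFirstInValues k p.2 with _ | t <;>
      simp [Option.or]

lemma get?_build (candidate_sets : List (String × List String)) (k : String) (hk : k ≠ "") :
    (pvBuildByKey candidate_sets).get? k = pvFirstMatch k candidate_sets := by
  unfold pvBuildByKey
  rw [get?_build_aux _ _ _ hk]
  simp [PySem.Dict.get?_empty, Option.or]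

-- empty key is never inserted
lemma get?_build_empty (candidate_sets : List (String × List String)) :
    (pvBuildByKey candidate_sets).get? "" = none := by
  have aux : ∀ (sets : List (String × List String)) (d : PySem.Dict String String),
      d.get? "" = none →
      (sets.foldl (fun d p =>
        p.2.foldl (fun d v =>
          let text := PySem.Str.strip v
          let key := pvNormKey text
          if key ≠ "" ∧ d.contains key = false then d.insert key text else d) d) d).get? "" = none := by
    intro sets
    induction sets with
    | nil => intro d hd; simpa using hd
    | cons p rest ih =>
      intro d hd
      simp only [List.foldl_cons]
      apply ih
      clear ih
      induction p.2 generalizing d with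
      | nil => simpa using hd
      | cons v vr ihv =>
        simp only [List.foldl_cons]
        apply ihv
        split
        · rename_i hcond
          have hne : ("" : String) ≠ pvNormKey (PySem.Str.strip v) := fun he => hcond.1 he.symm
          rw [PySem.Dict.get?_insert_of_ne _ _ hne]
          exact hd
        · exact hd
  exact aux _ _ (PySem.Dict.get?_empty _)

-- a first-match result carries the searched key
lemma firstInValues_key {k : String} {vs : List String} {t : String}
    (h : pvFirstInValues k vs = some t) : pvNormKey t = k := by
  induction vs with
  | nil => simp [pvFirstInValues] at h
  | cons v rest ih =>
    simp only [pvFirstInValues] at h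
    split at h
    · rename_i hkey; cases h; exact hkey
    · exact ih h

lemma firstMatch_key {k : String} {sets : List (String × List String)} {t : String}
    (h : pvFirstMatch k sets = some t) : pvNormKey t = k := by
  induction sets with
  | nil => simp [pvFirstMatch] at h
  | cons p rest ih =>
    simp only [pvFirstMatch] at h
    rcases hv : pvFirstInValues k p.2 with _ | u
    · rw [hv] at h; exact ih h
    · rw [hv] at h; cases h; exact firstInValues_key hv

-- the two selected-values loops have equal step functions
lemma step_eq (candidate_sets : List (String × List String))
    (acc : List String × PySem.Set String) (v : String) :
    (match (pvBuildByKey candidate_sets).get? (pvNormKey v) with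
     | none => acc
     | some c =>
       if c = "" ∨ PySem.Set.contains acc.2 (pvNormKey v) then acc
       else (acc.1 ++ [c], PySem.Set.add acc.2 (pvNormKey v)))
    = (if pvNormKey v = "" ∨ PySem.Set.contains acc.2 (pvNormKey v) then acc
       else
         match pvFirstMatch (pvNormKey v) candidate_sets with
         | none => acc
         | some t => (acc.1 ++ [t], PySem.Set.add acc.2 (pvNormKey v))) := by
  by_cases hk : pvNormKey v = ""
  · rw [hk, get?_build_empty]
    simp
  · rw [get?_build _ _ hk]
    rcases h : pvFirstMatch (pvNormKey v) candidate_sets with _ | t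
    · simp [hk]
    · have ht : t ≠ "" := by
        intro he
        apply hk
        rw [← firstMatch_key h, he, pvNormKey_empty]
      by_cases hs : PySem.Set.contains acc.2 (pvNormKey v) = true
      · have hmem : pvNormKey v ∈ acc.2 := (PySem.Set.contains_iff _ _).mp hs
        simp [hk, ht, hmem]
      · have hmem : pvNormKey v ∉ acc.2 := fun hm =>
          hs ((PySem.Set.contains_iff _ _).mpr hm)
        simp [hk, ht, hmem]

-- ===== VERDICT (by name: the statement is the Claim_ definition above) =====
theorem filter_llm_selection_to_candidates_py_spec : Claim_equal_filter_llm_selection_to_candidates_py := by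
  intro selected_values candidate_sets _
  unfold Spec_filter_llm_selection_to_candidates_py
  unfold filter_llm_selection_to_candidates_py filter_llm_selection_to_candidates_py_alt
  exact congrArg Prod.fst
    (PySem.List.foldl_congr_mem selected_values _ _ _ (fun acc x _ => step_eq candidate_sets acc x))
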